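-- pv_equiv track=rewrite | github.com/multilinguallog/MultilingualLog | data_generation/prompt_generator.py | template_format_changer
-- ===== SOURCE A (Python) =====
-- def template_format_changer(template):
--     count = template.count('<*>')
--     index = 0
--     parts = template.split("<*>")
--     new_template = parts[0]
--     while index < count:
--         replace_symbol = '<d_' + str(index) + '>'
--         new_template = new_template + replace_symbol + parts[index+1]
--         index = index+1
--     return new_template
-- ===== SOURCE B (Python) =====
-- def template_format_changer(template):
--     out = []
--     i = 0
--     n = 0
--     while i < len(template):
--         if template.startswith('<*>', i):
--             out.append('<d_' + str(n) + '>')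
--             n += 1
--             i += 3
--         else:
--             out.append(template[i])
--             i += 1
--     return ''.join(out)
-- ===== Notes on version B (the rewrite author's own statement) =====
-- stated objective: alternative
-- what changed: B replaces A's count+split+index-driven concatenation loop by a single left-to-right scan that matches the placeholder in place and emits the indexed token as it goes.
import Mathlib
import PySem

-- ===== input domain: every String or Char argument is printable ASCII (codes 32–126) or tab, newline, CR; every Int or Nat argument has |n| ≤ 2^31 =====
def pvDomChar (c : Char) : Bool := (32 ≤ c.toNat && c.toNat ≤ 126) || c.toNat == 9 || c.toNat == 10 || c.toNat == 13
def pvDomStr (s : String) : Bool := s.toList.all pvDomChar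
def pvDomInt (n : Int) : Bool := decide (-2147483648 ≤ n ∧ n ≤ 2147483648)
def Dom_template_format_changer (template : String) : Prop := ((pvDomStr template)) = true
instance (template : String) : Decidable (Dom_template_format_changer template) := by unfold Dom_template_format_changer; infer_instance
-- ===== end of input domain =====

-- B replaces A's count+split+index loop by a single left-to-right scan (alternative decomposition, same cost).

-- ===== PORT A =====
-- A on the char level: count the '<*>' occurrences, split on '<*>', then a
-- while loop (as a fold over range(count)) stitches parts back with '<d_i>'.
def tfcA (l : List Char) : List Char :=
  let count : Int := (PySem.Chars.count l ['<', '*', '>'] : Nat)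
  let parts : List (List Char) := PySem.Chars.splitOn l ['<', '*', '>']
  let new0 : List Char := PySem.List.pyGetD parts 0 []
  (PySem.List.pyRange 0 count).foldl
    (fun acc i =>
      acc ++ (['<', 'd', '_'] ++ PySem.Int.toChars i ++ ['>']) ++ PySem.List.pyGetD parts (i + 1) [])
    new0

def template_format_changer (template : String) : String :=
  String.ofList (tfcA template.toList)

-- ===== PORT B =====
def dtok (n : Int) : List Char := ['<', 'd', '_'] ++ PySem.Int.toChars n ++ ['>']

-- B's while loop: scan once; on a '<*>' match emit '<d_n>' and skip 3, else copy the char.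
def altGo : List Char → Int → List Char
  | [], _ => []
  | c :: rest, n =>
    if ['<', '*', '>'].isPrefixOf (c :: rest) then
      dtok n ++ altGo ((c :: rest).drop 3) (n + 1)
    else
      c :: altGo rest n
termination_by l => l.length
decreasing_by all_goals simp [List.drop]

def template_format_changer_alt (template : String) : String :=
  String.ofList (altGo template.toList 0)

-- ===== PRECONDITION & SPEC =====
def Spec_template_format_changer (template : String) (out : String) : Prop := out = template_format_changer_alt template
instance (template : String) (out : String) : Decidable (Spec_template_format_changer template out) := by unfold Spec_template_format_changer; infer_instance

-- ===== CLAIM (what is proved, stated in full; the proofs are below) =====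
def Claim_equal_template_format_changer : Prop := ∀ (template : String), Dom_template_format_changer template → Spec_template_format_changer template (template_format_changer template)

-- ===== LEMMAS AND PROOFS =====

-- (head, tail) of the list of pieces that splitting on '<*>' produces.
def pvSp : List Char → List Char × List (List Char)
  | [] => ([], [])
  | c :: r =>
    if ['<', '*', '>'].isPrefixOf (c :: r) then
      ([], (pvSp ((c :: r).drop 3)).1 :: (pvSp ((c :: r).drop 3)).2)
    else
      (c :: (pvSp r).1, (pvSp r).2)
termination_by l => l.length
decreasing_by all_goals simp [List.drop]

-- the tail of the reassembly: token n, piece, token n+1, piece, …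
def pvRest : Int → List (List Char) → List Char
  | _, [] => []
  | n, p :: ps => dtok n ++ p ++ pvRest (n + 1) ps

theorem pvCountGo (fuel : Nat) : ∀ (l : List Char) (acc : Nat), l.length ≤ fuel →
    PySem.Chars.count.go ['<', '*', '>'] fuel l acc = acc + (pvSp l).2.length := by
  induction fuel with
  | zero =>
    intro l acc h
    have : l = [] := by cases l <;> simp_all
    subst this
    rw [PySem.Chars.count.go.eq_def]
    simp [pvSp]
  | succ f ih =>
    intro l acc h
    match l with
    | [] => rw [PySem.Chars.count.go.eq_def]; simp [pvSp]
    | c :: r =>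
      rw [PySem.Chars.count.go.eq_def]
      simp only [pvSp]
      split
      · rw [ih _ _ (by simp at h ⊢; omega)]
        simp; omega
      · rw [ih _ _ (by simp at h ⊢; omega)]

theorem pvSplitGo (fuel : Nat) : ∀ (l cur : List Char) (acc : List (List Char)), l.length ≤ fuel →
    PySem.Chars.splitOn.go ['<', '*', '>'] fuel l cur acc =
      acc.reverse ++ (cur.reverse ++ (pvSp l).1) :: (pvSp l).2 := by
  induction fuel with
  | zero =>
    intro l cur acc h
    have : l = [] := by cases l <;> simp_all
    subst this
    rw [PySem.Chars.splitOn.go.eq_def]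
    simp [pvSp]
  | succ f ih =>
    intro l cur acc h
    match l with
    | [] => rw [PySem.Chars.splitOn.go.eq_def]; simp [pvSp]
    | c :: r =>
      rw [PySem.Chars.splitOn.go.eq_def]
      simp only [pvSp]
      split
      · rw [ih _ _ _ (by simp at h ⊢; omega)]
        simp
      · rw [ih _ _ _ (by simp at h ⊢; omega)]
        simp

theorem pvAltGoSpec : ∀ (l : List Char) (n : Int),
    altGo l n = (pvSp l).1 ++ pvRest n (pvSp l).2 := by
  intro l n
  induction l, n using altGo.induct with
  | case1 n => simp [altGo, pvSp, pvRest]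
  | case2 c rest n hpre ih =>
    rw [altGo, pvSp]
    simp only [hpre, if_pos]
    simp only [List.drop_succ_cons] at ih
    simp [pvRest, ih]
  | case3 c rest n hpre ih =>
    rw [altGo, pvSp]
    simp only [hpre]
    simp [ih]

theorem pvLoopEq : ∀ (ps : List (List Char)) (hd : List Char) (pref : List (List Char)) (acc : List Char),
    (PySem.List.pyRange (pref.length : Int) ((pref.length : Int) + (ps.length : Int))).foldl
      (fun acc i =>
        acc ++ (['<', 'd', '_'] ++ PySem.Int.toChars i ++ ['>']) ++
          PySem.List.pyGetD (hd :: (pref ++ ps)) (i + 1) []) acc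
    = acc ++ pvRest (pref.length : Int) ps := by
  intro ps
  induction ps with
  | nil =>
    intro hd pref acc
    have : PySem.List.pyRange (pref.length : Int) ((pref.length : Int) + 0) = [] := by
      simp [PySem.List.pyRange]
    simp [pvRest]
  | cons p ps ih =>
    intro hd pref acc
    rw [PySem.List.pyRange_one_cons (by push_cast [List.length_cons]; omega)]
    simp only [List.foldl_cons]
    have hget : PySem.List.pyGetD (hd :: (pref ++ p :: ps)) ((pref.length : Int) + 1) [] = p := by
      rw [show ((pref.length : Int) + 1) = ((pref.length + 1 : Nat) : Int) by push_cast; ring,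
        PySem.List.pyGetD_natCast]
      simp
    rw [hget]
    have e0 : hd :: (pref ++ p :: ps) = hd :: ((pref ++ [p]) ++ ps) := by simp
    have e2 : ((pref.length : Int) + ((p :: ps).length : Int))
        = (((pref ++ [p]).length : Int) + (ps.length : Int)) := by
      push_cast [List.length_append, List.length_cons, List.length_singleton, List.length_nil]; ring
    have e1 : ((pref.length : Int) + 1) = (((pref ++ [p]).length : Int)) := by
      push_cast [List.length_append, List.length_singleton, List.length_nil]; ring
    rw [e0, e2, e1, ih]
    simp [pvRest, dtok]

theorem pvMain (l : List Char) : tfcA l = altGo l 0 := by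
  have hsplit : PySem.Chars.splitOn l ['<', '*', '>'] = (pvSp l).1 :: (pvSp l).2 := by
    unfold PySem.Chars.splitOn
    rw [pvSplitGo _ _ _ _ (by omega)]
    simp
  have hcount : PySem.Chars.count l ['<', '*', '>'] = (pvSp l).2.length := by
    unfold PySem.Chars.count
    rw [if_neg (by simp), pvCountGo _ _ _ (le_refl _)]
    omega
  have hget0 : PySem.List.pyGetD ((pvSp l).1 :: (pvSp l).2) 0 [] = (pvSp l).1 := by
    rw [show (0 : Int) = ((0 : Nat) : Int) from rfl, PySem.List.pyGetD_natCast]; rfl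
  unfold tfcA
  rw [hsplit, hcount]
  refine Eq.trans ?_ (pvAltGoSpec l 0).symm
  show (PySem.List.pyRange 0 (((pvSp l).2.length : Nat) : Int)).foldl
      (fun acc i => acc ++ (['<', 'd', '_'] ++ PySem.Int.toChars i ++ ['>']) ++
        PySem.List.pyGetD ((pvSp l).1 :: (pvSp l).2) (i + 1) [])
      (PySem.List.pyGetD ((pvSp l).1 :: (pvSp l).2) 0 []) = _
  rw [hget0]
  simpa using pvLoopEq (pvSp l).2 (pvSp l).1 [] (pvSp l).1

-- ===== VERDICT (by name: the statement is the Claim_ definition above) =====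
theorem template_format_changer_spec : Claim_equal_template_format_changer := by
  intro template _
  unfold Spec_template_format_changer template_format_changer template_format_changer_alt
  rw [pvMain]
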